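-- pv_equiv track=rewrite | github.com/zmielko/UV_Bind | Design/Concatinated_Kmers_Design/Code/differentialKmer_OLS.py | extendKmers
-- ===== SOURCE A (Python) =====
-- def extRight(seq, k, prefSet, genSeqList, seenSet):
--     """
--     Given:
--         1. Sequence
--         2. k
--         3. Preference Set
--         4. Set of kmers already used
--         5. List to append generated sequences to
--     Recursively extends a sequence to the right if the next nucleotide makes
--         a kmer in the preference set and is not in the seen set. Otherwise,
--         appends to the genSeqList.
--     """
--     queryStart = len(seq) - k + 1
--     querySeq = seq[queryStart:]
--     canExt = False
--     for i in ['A', 'C', 'G', 'T']: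
--         if querySeq + i in prefSet and querySeq + i not in seenSet:
--             canExt = True
--             seenSet.add(querySeq + i)
--             extRight(seq + i, k, prefSet, genSeqList, seenSet = seenSet)
--     if canExt == False:
--         genSeqList.append(seq)
--
-- def extLeft(seq, k, prefSet, genSeqLeftList, seenSet):
--     """
--     Given:
--         1. Sequence
--         2. k
--         3. Preference Set
--         4. Set of kmers already used
--         5. List to append generated sequences to
--     Recursively extends a sequence to the left if the next nucleotide makes
--         a kmer in the preference set and is not in the seen set. Otherwise,
--         appends to the genSeqLeftList.
--     """
--     querySeq = seq[:k-1]
--     canExt = False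
--     for i in ['A', 'C', 'G', 'T']:
--         if i + querySeq in prefSet and i + querySeq not in seenSet:
--             canExt = True
--             seenSet.add(i + querySeq)
--             extLeft(i + seq, k, prefSet, genSeqLeftList, seenSet = seenSet)
--     if canExt == False:
--         genSeqLeftList.append(seq)
--
-- def extendKmers(kmerList, prefSet, k=6):
--     """
--     Given a list of kmers, generates probes that are extended as far as possible using
--         the extRight and extLeft methods. Returns all unique generated probes as a list.
--     """
--     totalProbes = set()
--     # Extend left then right
--     for i in kmerList:
--         genSeqList = []
--         seenSet = set([i])
--         # Extend sequence to the left
--         extLeft(i, k, prefSet = prefSet, genSeqLeftList = genSeqList, seenSet = seenSet)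
--         # Extend sequences to the right
--         genSeqRightList = []
--         for j in genSeqList:
--             extRight(j, k, prefSet = prefSet, genSeqList=genSeqRightList, seenSet = seenSet)
--         # Update the probe set
--         totalProbes.update(genSeqRightList)
--     # Extend right then left
--     for i in kmerList:
--         genSeqList = []
--         seenSet = set([i])
--         # Extend sequence to the right
--         extRight(i, k, prefSet = prefSet, genSeqList = genSeqList, seenSet = seenSet)
--         # Extend sequences to the left
--         genSeqLeftList = []
--         for j in genSeqList:
--             extLeft(j, k, prefSet = prefSet, genSeqLeftList=genSeqLeftList, seenSet = seenSet)
--         # Update the probe set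
--         totalProbes.update(genSeqLeftList)
--     totalProbesList = sorted(list(totalProbes))
--     return(totalProbesList)
-- ===== SOURCE B (Python) =====
-- # B: iterative stack-based DFS (one parameterized worker with per-frame nucleotide cursor)
-- # replacing A's two mutually-similar recursive helpers; outer passes folded into one loop.
-- def _run(seq0, k, prefSet, seen, right, out):
--     stack = [[seq0, list('ACGT'), False]]
--     while stack:
--         fr = stack[-1]
--         if not fr[1]:
--             stack.pop()
--             if not fr[2]:
--                 out.append(fr[0])
--             continue
--         i = fr[1].pop(0)
--         seq = fr[0]
--         if right:
--             q = seq[len(seq) - k + 1:] + i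
--             child = seq + i
--         else:
--             q = i + seq[:k - 1]
--             child = i + seq
--         if q in prefSet and q not in seen:
--             seen.add(q)
--             fr[2] = True
--             stack.append([child, list('ACGT'), False])
--
-- def extendKmers(kmerList, prefSet, k=6):
--     probes = set()
--     for right_first in (False, True):
--         for seed in kmerList:
--             seen = {seed}
--             first = []
--             _run(seed, k, prefSet, seen, right_first, first)
--             second = []
--             for s in first:
--                 _run(s, k, prefSet, seen, not right_first, second)
--             probes.update(second)
--     return sorted(probes)
-- ===== Notes on version B (the rewrite author's own statement) =====
-- stated objective: alternative
-- what changed: A's two recursive extenders are replaced by one explicit stack-based DFS worker with a per-frame nucleotide cursor (direction passed as a flag), and A's two written-out passes become a loop over the direction flag; same traversal order and results.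
import Mathlib
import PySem

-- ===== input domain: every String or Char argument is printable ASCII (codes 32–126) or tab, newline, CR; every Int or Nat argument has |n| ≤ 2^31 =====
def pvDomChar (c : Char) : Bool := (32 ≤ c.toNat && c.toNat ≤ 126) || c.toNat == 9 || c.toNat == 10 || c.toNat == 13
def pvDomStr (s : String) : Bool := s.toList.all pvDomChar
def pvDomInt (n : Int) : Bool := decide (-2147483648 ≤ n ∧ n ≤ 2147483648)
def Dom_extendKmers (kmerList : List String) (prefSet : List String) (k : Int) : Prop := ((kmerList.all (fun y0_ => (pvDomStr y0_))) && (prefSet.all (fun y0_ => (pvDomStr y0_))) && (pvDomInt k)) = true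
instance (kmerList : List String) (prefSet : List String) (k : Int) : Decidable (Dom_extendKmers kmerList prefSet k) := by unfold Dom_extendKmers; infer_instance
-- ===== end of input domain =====

-- B replaces A's two recursive extenders by one explicit-stack DFS worker (per-frame
-- nucleotide cursor) and folds A's two written-out passes into a loop over a direction flag;
-- objective: alternative decomposition, same results.
-- Recursion depth in A is at most prefSet.length + 1 (each nested call records a fresh member
-- of prefSet in the shared seen-set), so both ports use that number as fuel; the fuel is a
-- termination device only and is never exhausted on the inputs the Python accepts.

-- ===== PORT A =====
def pvNucs : List String := ["A", "C", "G", "T"]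

-- the for-loop body of extRight/extLeft: probe i = the kmer tested, child i = the extended seq
def pvGoNucs (recCall : String → List String → PySem.Set String → List String × PySem.Set String)
    (prefSet : List String) (probe child : String → String) :
    List String → Bool → List String → PySem.Set String → Bool × List String × PySem.Set String
  | [], c, g, s => (c, g, s)
  | i :: t, c, g, s =>
    if prefSet.contains (probe i) && !(PySem.Set.contains s (probe i)) then
      let r := recCall (child i) g (PySem.Set.add s (probe i))
      pvGoNucs recCall prefSet probe child t true r.1 r.2
    else
      pvGoNucs recCall prefSet probe child t c g s

def extRightF (k : Int) (prefSet : List String) :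
    Nat → String → List String → PySem.Set String → List String × PySem.Set String
  | 0, _, gen, seen => (gen, seen)
  | f + 1, seq, gen, seen =>
    let q := PySem.Str.slice seq (some ((PySem.Str.len seq : Int) - k + 1)) none
    let r := pvGoNucs (fun s g se => extRightF k prefSet f s g se) prefSet
      (fun i => q ++ i) (fun i => seq ++ i) pvNucs false gen seen
    if r.1 then (r.2.1, r.2.2) else (r.2.1 ++ [seq], r.2.2)

def extLeftF (k : Int) (prefSet : List String) :
    Nat → String → List String → PySem.Set String → List String × PySem.Set String
  | 0, _, gen, seen => (gen, seen)
  | f + 1, seq, gen, seen =>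
    let q := PySem.Str.slice seq none (some (k - 1))
    let r := pvGoNucs (fun s g se => extLeftF k prefSet f s g se) prefSet
      (fun i => i ++ q) (fun i => i ++ seq) pvNucs false gen seen
    if r.1 then (r.2.1, r.2.2) else (r.2.1 ++ [seq], r.2.2)

def extendKmers (kmerList : List String) (prefSet : List String) (k : Int) : List String :=
  let F := prefSet.length + 1
  let probes1 := kmerList.foldl (fun (tp : PySem.Set String) i =>
    let seen0 := PySem.Set.ofList [i]
    let r1 := extLeftF k prefSet F i [] seen0
    let r2 := r1.1.foldl (fun (st : List String × PySem.Set String) j =>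
      extRightF k prefSet F j st.1 st.2) ([], r1.2)
    PySem.Set.update tp r2.1) PySem.Set.empty
  let probes2 := kmerList.foldl (fun (tp : PySem.Set String) i =>
    let seen0 := PySem.Set.ofList [i]
    let r1 := extRightF k prefSet F i [] seen0
    let r2 := r1.1.foldl (fun (st : List String × PySem.Set String) j =>
      extLeftF k prefSet F j st.1 st.2) ([], r1.2)
    PySem.Set.update tp r2.1) probes1
  PySem.List.sorted probes2 (fun x => x) false

-- ===== PORT B =====
-- weight used only as the termination measure of the stack machine
def pvW : Nat → Nat
  | 0 => 1
  | f + 1 => 4 * (pvW f + 1) + 1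

def pvWt : String × List String × Bool × Nat → Nat
  | (_, _, _, 0) => 1
  | (_, ns, _, f + 1) => ns.length * (pvW f + 1) + 1

def pvRunStack (k : Int) (prefSet : List String) (right : Bool) :
    List (String × List String × Bool × Nat) → List String → PySem.Set String →
    List String × PySem.Set String
  | [], out, seen => (out, seen)
  | (_, _, _, 0) :: rest, out, seen => pvRunStack k prefSet right rest out seen
  | (seq, [], c, _ + 1) :: rest, out, seen =>
    pvRunStack k prefSet right rest (if c then out else out ++ [seq]) seen
  | (seq, i :: t, c, f + 1) :: rest, out, seen =>
    let q := if right then PySem.Str.slice seq (some ((PySem.Str.len seq : Int) - k + 1)) none ++ i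
             else i ++ PySem.Str.slice seq none (some (k - 1))
    let child := if right then seq ++ i else i ++ seq
    if prefSet.contains q && !(PySem.Set.contains seen q) then
      pvRunStack k prefSet right ((child, pvNucs, false, f) :: (seq, t, true, f + 1) :: rest)
        out (PySem.Set.add seen q)
    else
      pvRunStack k prefSet right ((seq, t, c, f + 1) :: rest) out seen
  termination_by st _ _ => (st.map pvWt).sum
  decreasing_by
  · simp [pvWt]
  · simp [pvWt]
  · simp only [List.map_cons, List.sum_cons, pvWt, List.length_cons, Nat.succ_mul, pvNucs]
    cases f <;> simp [pvWt, pvW] <;> omega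
  · simp only [List.map_cons, List.sum_cons, pvWt, List.length_cons, Nat.succ_mul]
    omega

def extendKmers_alt (kmerList : List String) (prefSet : List String) (k : Int) : List String :=
  let F := prefSet.length + 1
  let probes := [false, true].foldl (fun (tp : PySem.Set String) rightFirst =>
    kmerList.foldl (fun (tp : PySem.Set String) seed =>
      let seen0 := PySem.Set.ofList [seed]
      let r1 := pvRunStack k prefSet rightFirst [(seed, pvNucs, false, F)] [] seen0
      let r2 := r1.1.foldl (fun (st : List String × PySem.Set String) s =>
        pvRunStack k prefSet (!rightFirst) [(s, pvNucs, false, F)] st.1 st.2) ([], r1.2)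
      PySem.Set.update tp r2.1) tp) PySem.Set.empty
  PySem.List.sorted probes (fun x => x) false

-- ===== PRECONDITION & SPEC =====
def Spec_extendKmers (kmerList : List String) (prefSet : List String) (k : Int) (out : List String) : Prop := out = extendKmers_alt kmerList prefSet k
instance (kmerList : List String) (prefSet : List String) (k : Int) (out : List String) : Decidable (Spec_extendKmers kmerList prefSet k out) := by unfold Spec_extendKmers; infer_instance

-- ===== CLAIM (what is proved, stated in full; the proofs are below) =====
def Claim_equal_extendKmers : Prop := ∀ (kmerList : List String) (prefSet : List String) (k : Int), Dom_extendKmers kmerList prefSet k → Spec_extendKmers kmerList prefSet k (extendKmers kmerList prefSet k)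

-- ===== LEMMAS AND PROOFS =====

-- one full invocation of extRight at fuel f, entered mid-loop at cursor ns / flag c
def pvStepR (k : Int) (prefSet : List String) :
    Nat → String → List String → Bool → List String → PySem.Set String →
    List String × PySem.Set String
  | 0, _, _, _, out, seen => (out, seen)
  | f + 1, seq, ns, c, out, seen =>
    let q := PySem.Str.slice seq (some ((PySem.Str.len seq : Int) - k + 1)) none
    let r := pvGoNucs (fun s g se => extRightF k prefSet f s g se) prefSet
      (fun i => q ++ i) (fun i => seq ++ i) ns c out seen
    if r.1 then (r.2.1, r.2.2) else (r.2.1 ++ [seq], r.2.2)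

def pvStepL (k : Int) (prefSet : List String) :
    Nat → String → List String → Bool → List String → PySem.Set String →
    List String × PySem.Set String
  | 0, _, _, _, out, seen => (out, seen)
  | f + 1, seq, ns, c, out, seen =>
    let q := PySem.Str.slice seq none (some (k - 1))
    let r := pvGoNucs (fun s g se => extLeftF k prefSet f s g se) prefSet
      (fun i => i ++ q) (fun i => i ++ seq) ns c out seen
    if r.1 then (r.2.1, r.2.2) else (r.2.1 ++ [seq], r.2.2)

theorem pvStepR_eq_ext (k : Int) (prefSet : List String) (f : Nat) (seq : String)
    (out : List String) (seen : PySem.Set String) :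
    pvStepR k prefSet f seq pvNucs false out seen = extRightF k prefSet f seq out seen := by
  cases f <;> rfl

theorem pvStepL_eq_ext (k : Int) (prefSet : List String) (f : Nat) (seq : String)
    (out : List String) (seen : PySem.Set String) :
    pvStepL k prefSet f seq pvNucs false out seen = extLeftF k prefSet f seq out seen := by
  cases f <;> rfl

theorem pvSimR (k : Int) (prefSet : List String) :
    ∀ (f : Nat) (seq : String) (ns : List String) (c : Bool) (out : List String)
      (seen : PySem.Set String) (rest : List (String × List String × Bool × Nat)),
      pvRunStack k prefSet true ((seq, ns, c, f) :: rest) out seen =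
        pvRunStack k prefSet true rest (pvStepR k prefSet f seq ns c out seen).1
          (pvStepR k prefSet f seq ns c out seen).2 := by
  intro f
  induction f with
  | zero => intro seq ns c out seen rest; rw [pvRunStack]; simp [pvStepR]
  | succ f ih =>
    intro seq ns
    induction ns with
    | nil =>
      intro c out seen rest
      rw [pvRunStack]
      cases c <;> simp [pvStepR, pvGoNucs]
    | cons i t iht =>
      intro c out seen rest
      rw [pvRunStack]
      by_cases h : (PySem.Str.slice seq (some ((seq.length : Int) - k + 1)) none ++ i) ∈ prefSet ∧ (PySem.Str.slice seq (some ((seq.length : Int) - k + 1)) none ++ i) ∉ seen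
      · have hb : (prefSet.contains (PySem.Str.slice seq (some ((PySem.Str.len seq : Int) - k + 1)) none ++ i)
            && !(PySem.Set.contains seen (PySem.Str.slice seq (some ((PySem.Str.len seq : Int) - k + 1)) none ++ i))) = true := by simpa using h
        simp only [reduceIte, hb, if_true]
        rw [ih, pvStepR_eq_ext, iht]
        simp [pvStepR, pvGoNucs, h]
      · have hb : (prefSet.contains (PySem.Str.slice seq (some ((PySem.Str.len seq : Int) - k + 1)) none ++ i)
            && !(PySem.Set.contains seen (PySem.Str.slice seq (some ((PySem.Str.len seq : Int) - k + 1)) none ++ i))) = false := by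
          simpa using h
        simp only [reduceIte, hb, Bool.false_eq_true, if_false]
        rw [iht]
        simp [pvStepR, pvGoNucs, h]

theorem pvSimL (k : Int) (prefSet : List String) :
    ∀ (f : Nat) (seq : String) (ns : List String) (c : Bool) (out : List String)
      (seen : PySem.Set String) (rest : List (String × List String × Bool × Nat)),
      pvRunStack k prefSet false ((seq, ns, c, f) :: rest) out seen =
        pvRunStack k prefSet false rest (pvStepL k prefSet f seq ns c out seen).1
          (pvStepL k prefSet f seq ns c out seen).2 := by
  intro f
  induction f with
  | zero => intro seq ns c out seen rest; rw [pvRunStack]; simp [pvStepL]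
  | succ f ih =>
    intro seq ns
    induction ns with
    | nil =>
      intro c out seen rest
      rw [pvRunStack]
      cases c <;> simp [pvStepL, pvGoNucs]
    | cons i t iht =>
      intro c out seen rest
      rw [pvRunStack]
      simp only [Bool.false_eq_true, if_false]
      by_cases h : (i ++ PySem.Str.slice seq none (some (k - 1))) ∈ prefSet ∧ (i ++ PySem.Str.slice seq none (some (k - 1))) ∉ seen
      · have hb : (prefSet.contains (i ++ PySem.Str.slice seq none (some (k - 1)))
            && !(PySem.Set.contains seen (i ++ PySem.Str.slice seq none (some (k - 1))))) = true := by simpa using h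
        simp only [hb, if_true]
        rw [ih, pvStepL_eq_ext, iht]
        simp [pvStepL, pvGoNucs, h]
      · have hb : (prefSet.contains (i ++ PySem.Str.slice seq none (some (k - 1)))
            && !(PySem.Set.contains seen (i ++ PySem.Str.slice seq none (some (k - 1))))) = false := by
          simpa using h
        simp only [hb, Bool.false_eq_true, if_false]
        rw [iht]
        simp [pvStepL, pvGoNucs, h]

theorem pvRunR (k : Int) (prefSet : List String) (F : Nat) (seq : String)
    (out : List String) (seen : PySem.Set String) :
    pvRunStack k prefSet true [(seq, pvNucs, false, F)] out seen =
      extRightF k prefSet F seq out seen := by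
  rw [pvSimR, pvStepR_eq_ext, pvRunStack]

theorem pvRunL (k : Int) (prefSet : List String) (F : Nat) (seq : String)
    (out : List String) (seen : PySem.Set String) :
    pvRunStack k prefSet false [(seq, pvNucs, false, F)] out seen =
      extLeftF k prefSet F seq out seen := by
  rw [pvSimL, pvStepL_eq_ext, pvRunStack]

-- ===== VERDICT (by name: the statement is the Claim_ definition above) =====
theorem extendKmers_spec : Claim_equal_extendKmers := by
  intro kmerList prefSet k _
  unfold Spec_extendKmers extendKmers extendKmers_alt
  simp only [List.foldl, Bool.not_false, Bool.not_true, pvRunR, pvRunL]
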